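-- pv_equiv track=rewrite | github.com/roypel/cs-projects | Python/hw6.py | maxmatch_new
-- ===== SOURCE A (Python) =====
-- def maxmatch_new(T,p,w=2**12-1,max_length=2**5-1):
--     assert isinstance(T,str)
--     n = len (T)
--     maxmatch = 0
--     offset = 0
--     for m in range(1, min(p+1, w)):
--         current_length = 0
--         for k in range (0, min(max_length, n-p, m)):
--             if T[p-m+k] != T[p+k]:
--                 break
--             else:
--                 current_length = k+1
--         if maxmatch < current_length:
--             maxmatch = current_length
--             offset = m
--     return offset, maxmatch
-- ===== SOURCE B (Python) =====
-- def maxmatch_new(T, p, w=2**12-1, max_length=2**5-1):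
--     # A match of length l at offset m lies entirely in T[:p] (since l <= m), so the best match
--     # length is the largest l for which the prefix T[p:p+l] occurs inside the window T[lo:p] -
--     # a predicate monotone in l, found by binary search; str.rfind's rightmost occurrence
--     # gives the smallest offset, matching A's tie-break.
--     assert isinstance(T, str)
--     n = len(T)
--     cap = min(max_length, n - p, p, w - 1)
--     lo = p - min(p, w - 1)
--     lo_l, hi_l, best = 1, cap, (0, 0)
--     while lo_l <= hi_l:
--         mid = (lo_l + hi_l) // 2
--         i = T.rfind(T[p:p+mid], lo, p)
--         if i == -1:
--             hi_l = mid - 1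
--         else:
--             best = (p - i, mid)
--             lo_l = mid + 1
--     return best
-- ===== Notes on version B (the rewrite author's own statement) =====
-- stated objective: faster
-- what changed: Instead of scanning every offset m in the window and re-comparing characters (A's nested loops), B binary-searches the best match length l (a match of length l fits entirely before p since l <= m, so 'the prefix T[p:p+l] occurs in T[lo:p]' is monotone in l) and each probe is one C-level str.rfind, whose rightmost occurrence gives A's smallest-offset tie-break.
import Mathlib
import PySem

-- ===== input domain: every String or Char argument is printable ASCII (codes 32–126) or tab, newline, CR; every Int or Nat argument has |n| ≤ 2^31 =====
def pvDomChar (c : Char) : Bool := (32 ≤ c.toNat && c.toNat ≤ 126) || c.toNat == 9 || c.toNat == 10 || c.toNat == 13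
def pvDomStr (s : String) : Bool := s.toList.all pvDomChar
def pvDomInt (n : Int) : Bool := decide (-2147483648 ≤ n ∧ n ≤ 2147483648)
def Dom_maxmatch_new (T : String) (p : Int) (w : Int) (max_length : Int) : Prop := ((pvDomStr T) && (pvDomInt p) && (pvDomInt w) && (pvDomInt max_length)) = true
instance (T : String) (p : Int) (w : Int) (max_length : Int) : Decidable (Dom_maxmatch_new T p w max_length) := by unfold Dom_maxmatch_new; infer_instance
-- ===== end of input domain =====

-- B replaces A's offset-by-offset rescans with a binary search on the match length (occurrence
-- of a length-l prefix in the window is monotone in l), each probe a single str.rfind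
-- (rightmost occurrence = smallest offset); measured much faster on large inputs.

-- ===== PORT A =====
-- inner 'for k in range(...)' with break: returns current_length at the first mismatch.
-- T[p-m+k] / T[p+k] are ported with pyGetD: on every executed iteration k < min(max_length, n-p, m)
-- and 1 ≤ m ≤ p, so both indices are in range and Python never raises.
def pvInnerA (cs : List Char) (p m : Int) : List Int → Int → Int
  | [], cur => cur
  | k :: ks, cur =>
    if PySem.List.pyGetD cs (p - m + k) ' ' ≠ PySem.List.pyGetD cs (p + k) ' ' then cur
    else pvInnerA cs p m ks (k + 1)

def maxmatch_new (T : String) (p : Int) (w : Int) (max_length : Int) : Int × Int :=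
  let cs := T.toList
  let n : Int := cs.length
  let r := (PySem.List.pyRange 1 (min (p + 1) w) 1).foldl
    (fun st m =>
      let cur := pvInnerA cs p m (PySem.List.pyRange 0 (min max_length (min (n - p) m)) 1) 0
      if st.1 < cur then (cur, m) else st) (0, 0)
  (r.2, r.1)

-- ===== PORT B =====
-- the 'while lo_l <= hi_l' binary search over the match length, with its running best pair
def pvSearchB (cs : List Char) (p lo : Int) (lo_l hi_l : Int) (best : Int × Int) : Int × Int :=
  if h : lo_l ≤ hi_l then
    let mid := PySem.Int.floordiv (lo_l + hi_l) 2
    let i := PySem.Chars.rfindFrom cs (PySem.List.slice cs (some p) (some (p + mid))) lo (some p)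
    if i = -1 then pvSearchB cs p lo lo_l (mid - 1) best
    else pvSearchB cs p lo (mid + 1) hi_l (p - i, mid)
  else best
termination_by (hi_l - lo_l + 1).toNat
decreasing_by
  · have := PySem.Int.floordiv_two_mid_bounds h; omega
  · have := PySem.Int.floordiv_two_mid_bounds h; omega

def maxmatch_new_alt (T : String) (p : Int) (w : Int) (max_length : Int) : Int × Int :=
  let cs := T.toList
  let n : Int := cs.length
  let cap := min max_length (min (n - p) (min p (w - 1)))
  let lo := p - min p (w - 1)
  pvSearchB cs p lo 1 cap (0, 0)

-- ===== PRECONDITION & SPEC =====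
def Spec_maxmatch_new (T : String) (p : Int) (w : Int) (max_length : Int) (out : Int × Int) : Prop := out = maxmatch_new_alt T p w max_length
instance (T : String) (p : Int) (w : Int) (max_length : Int) (out : Int × Int) : Decidable (Spec_maxmatch_new T p w max_length out) := by unfold Spec_maxmatch_new; infer_instance

-- ===== CLAIM (what is proved, stated in full; the proofs are below) =====
def Claim_equal_maxmatch_new : Prop := ∀ (T : String) (p : Int) (w : Int) (max_length : Int), Dom_maxmatch_new T p w max_length → Spec_maxmatch_new T p w max_length (maxmatch_new T p w max_length)

-- ===== LEMMAS AND PROOFS =====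

-- longest common prefix length of two lists
def pvLCP : List Char → List Char → Nat
  | a :: as, b :: bs => if a = b then pvLCP as bs + 1 else 0
  | _, _ => 0

-- the value A's inner loop computes for offset m: the common-prefix length capped by min(ml, n-p, m)
def pvF (cs : List Char) (p ml m : Int) : Int :=
  if min ml (min ((cs.length : Int) - p) m) ≤ 0 then 0
  else min (min ml (min ((cs.length : Int) - p) m))
    (pvLCP (cs.drop (p - m).toNat) (cs.drop p.toNat))

-- the prefix of length l of T[p:] occurs starting at i, entirely inside the window T[lo:p]
def pvQ (cs : List Char) (p lo : Int) (l : Nat) : Prop :=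
  ∃ i : Nat, lo.toNat ≤ i ∧ (i : Int) + l ≤ p ∧ (cs.drop p.toNat).take l <+: cs.drop i

lemma pvF_le (cs : List Char) (p ml m : Int) (h : 1 ≤ pvF cs p ml m) :
    pvF cs p ml m ≤ ml ∧ pvF cs p ml m ≤ (cs.length : Int) - p ∧ pvF cs p ml m ≤ m := by
  unfold pvF at *
  split_ifs at * with hc
  · omega
  · simp only [min_le_iff, le_min_iff] at *
    omega

lemma pvQ_mono (cs : List Char) (p lo : Int) (l l' : Nat) (h : l' ≤ l)
    (hq : pvQ cs p lo l) : pvQ cs p lo l' := by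
  obtain ⟨i, h1, h2, h3⟩ := hq
  exact ⟨i, h1, by omega, List.IsPrefix.trans (List.take_prefix_take_left h) h3⟩

lemma pvLCP_ge_iff (l : Nat) : ∀ (a b : List Char),
    l ≤ pvLCP a b ↔ b.take l <+: a ∧ l ≤ b.length := by
  induction l with
  | zero => intro a b; simp
  | succ l ih =>
    intro a b
    cases a with
    | nil =>
      cases b with
      | nil => simp [pvLCP]
      | cons y bs => simp [pvLCP]
    | cons x as =>
      cases b with
      | nil => simp [pvLCP]
      | cons y bs =>
        simp only [pvLCP, List.take_succ_cons, List.cons_prefix_cons, List.length_cons]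
        split_ifs with hxy
        · subst hxy
          rw [Nat.succ_le_succ_iff, ih as bs, Nat.succ_le_succ_iff]
          tauto
        · constructor
          · omega
          · rintro ⟨⟨h1, _⟩, _⟩; exact absurd h1.symm hxy

lemma pvLCP_cons (cs : List Char) (a b : Nat) (ha : a < cs.length) (hb : b < cs.length) :
    pvLCP (cs.drop a) (cs.drop b) =
      if cs[a] = cs[b] then pvLCP (cs.drop (a+1)) (cs.drop (b+1)) + 1 else 0 := by
  rw [List.drop_eq_getElem_cons ha, List.drop_eq_getElem_cons hb]
  rfl

-- A's inner loop started at k = j with accumulator j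
lemma pvInnerA_eq (cs : List Char) (p m c : Int) (hm1 : 1 ≤ m) (hmp : m ≤ p)
    (hcn : p + c ≤ (cs.length : Int)) :
    ∀ j : Int, 0 ≤ j → j ≤ c →
      pvInnerA cs p m (PySem.List.pyRange j c 1) j =
        j + min (c - j) (pvLCP (cs.drop (p - m + j).toNat) (cs.drop (p + j).toNat)) := by
  intro j h0 hjc
  generalize hd : (c - j).toNat = d
  induction d generalizing j with
  | zero =>
    have hcj : c = j := by omega
    rw [hcj, PySem.List.pyRange_one_eq_nil (le_refl j)]
    simp [pvInnerA]
  | succ d ih =>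
    have hjc' : j < c := by omega
    rw [PySem.List.pyRange_one_cons hjc']
    have hA : (0:Int) ≤ p - m + j := by omega
    have hA' : p - m + j < cs.length := by omega
    have hB : (0:Int) ≤ p + j := by omega
    have hB' : p + j < cs.length := by omega
    have hcons := pvLCP_cons cs (p - m + j).toNat (p + j).toNat (by omega) (by omega)
    show (if PySem.List.pyGetD cs (p - m + j) ' ' ≠ PySem.List.pyGetD cs (p + j) ' ' then j
      else pvInnerA cs p m (PySem.List.pyRange (j+1) c 1) (j+1)) = _
    rw [PySem.List.pyGetD_eq_getElem cs ' ' hA hA', PySem.List.pyGetD_eq_getElem cs ' ' hB hB']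
    by_cases heq : cs[(p - m + j).toNat] = cs[(p + j).toNat]
    · rw [if_neg (by simp [heq]), ih (j+1) (by omega) (by omega) (by omega)]
      rw [hcons, if_pos heq]
      have e1 : (p - m + (j+1)).toNat = (p - m + j).toNat + 1 := by omega
      have e2 : (p + (j+1)).toNat = (p + j).toNat + 1 := by omega
      rw [e1, e2]
      push_cast
      omega
    · rw [if_pos (by simp [heq]), hcons, if_neg heq]
      simp
      omega

lemma pvCur_eq (cs : List Char) (p ml m : Int) (hm1 : 1 ≤ m) (hmp : m ≤ p) :
    pvInnerA cs p m (PySem.List.pyRange 0 (min ml (min ((cs.length : Int) - p) m)) 1) 0 =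
      pvF cs p ml m := by
  set c := min ml (min ((cs.length : Int) - p) m) with hc
  by_cases hc0 : c ≤ 0
  · rw [PySem.List.pyRange_one_eq_nil hc0]
    unfold pvF
    rw [if_pos hc0]
    rfl
  · have := pvInnerA_eq cs p m c hm1 hmp (by omega) 0 (by omega) (by omega)
    simp only [add_zero, sub_zero, zero_add] at this
    rw [this]
    unfold pvF
    rw [if_neg hc0]

-- characterization of A's outer fold: r.1 is the maximum of pvF over [1, M), r.2 its first argmax
lemma pvFoldA (cs : List Char) (p ml : Int) (M : Int) (hM : M ≤ p + 1) :
    let r := (PySem.List.pyRange 1 M 1).foldl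
      (fun st m =>
        let cur := pvInnerA cs p m (PySem.List.pyRange 0 (min ml (min (((cs.length : Int)) - p) m)) 1) 0
        if st.1 < cur then (cur, m) else st) (0, 0)
    (∀ m : Int, 1 ≤ m → m < M → pvF cs p ml m ≤ r.1) ∧
      ((r.1 = 0 ∧ r.2 = 0) ∨
        (1 ≤ r.2 ∧ r.2 < M ∧ r.1 = pvF cs p ml r.2 ∧ 1 ≤ r.1 ∧
          ∀ m : Int, 1 ≤ m → m < r.2 → pvF cs p ml m < r.1)) := by
  intro r
  generalize hk : (M - 1).toNat = k
  induction k generalizing M with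
  | zero =>
    have hM1 : M ≤ 1 := by omega
    have : r = (0, 0) := by
      simp only [r, PySem.List.pyRange_one_eq_nil hM1, List.foldl_nil]
    rw [this]
    exact ⟨fun m h1 h2 => by omega, Or.inl ⟨rfl, rfl⟩⟩
  | succ k ih =>
    have hM2 : 2 ≤ M := by omega
    have hsplit : PySem.List.pyRange 1 M 1 = PySem.List.pyRange 1 (M - 1) 1 ++ [M - 1] := by
      have := PySem.List.pyRange_one_succ_right (a := 1) (b := M - 1) (by omega)
      rw [← this]
      norm_num
    obtain ⟨ih1, ih2⟩ := ih (M - 1) (by omega) (by omega)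
    set r' := (PySem.List.pyRange 1 (M - 1) 1).foldl
      (fun st m =>
        let cur := pvInnerA cs p m (PySem.List.pyRange 0 (min ml (min (((cs.length : Int)) - p) m)) 1) 0
        if st.1 < cur then (cur, m) else st) (0, 0) with hr'
    have hr'1 : 0 ≤ r'.1 := by
      rcases ih2 with ⟨h1, _⟩ | ⟨_, _, _, h4, _⟩ <;> omega
    have hcur : pvInnerA cs p (M - 1) (PySem.List.pyRange 0 (min ml (min (((cs.length : Int)) - p) (M - 1))) 1) 0
        = pvF cs p ml (M - 1) := pvCur_eq cs p ml (M - 1) (by omega) (by omega)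
    have hrdef : r = if r'.1 < pvF cs p ml (M - 1) then (pvF cs p ml (M - 1), M - 1) else r' := by
      simp only [r, hsplit, List.foldl_append, List.foldl_cons, List.foldl_nil, ← hr', hcur]
    by_cases hlt : r'.1 < pvF cs p ml (M - 1)
    · rw [if_pos hlt] at hrdef
      rw [hrdef]
      constructor
      · intro m h1 h2
        by_cases hm : m < M - 1
        · exact le_trans (ih1 m h1 hm) (by omega)
        · have : m = M - 1 := by omega
          rw [this]
      · exact Or.inr ⟨by omega, by omega, rfl, by omega,
          fun m h1 h2 => lt_of_le_of_lt (ih1 m h1 h2) hlt⟩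
    · rw [if_neg hlt] at hrdef
      rw [hrdef]
      constructor
      · intro m h1 h2
        by_cases hm : m < M - 1
        · exact ih1 m h1 hm
        · have : m = M - 1 := by omega
          rw [this]; omega
      · rcases ih2 with h | ⟨h1, h2, h3, h4, h5⟩
        · exact Or.inl h
        · exact Or.inr ⟨h1, by omega, h3, h4, h5⟩

-- l ≤ pvF m  ↔  the length-l prefix of T[p:] occurs at p - m with l ≤ m
lemma pvBridge (cs : List Char) (p ml m : Int) (l : Nat) (hl1 : 1 ≤ l)
    (hml : (l : Int) ≤ ml) (hnp : (l : Int) ≤ (cs.length : Int) - p) (hm1 : 1 ≤ m)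
    (hp0 : 0 ≤ p - m) :
    ((l : Int) ≤ pvF cs p ml m) ↔
      ((cs.drop p.toNat).take l <+: cs.drop (p - m).toNat ∧ (l : Int) ≤ m) := by
  unfold pvF
  rw [if_neg (by omega)]
  have hlen : l ≤ (cs.drop p.toNat).length := by
    rw [List.length_drop]; omega
  have hlcp := pvLCP_ge_iff l (cs.drop (p - m).toNat) (cs.drop p.toNat)
  constructor
  · intro h
    simp only [le_min_iff] at h
    have : l ≤ pvLCP (cs.drop (p - m).toNat) (cs.drop p.toNat) := by exact_mod_cast h.2
    exact ⟨(hlcp.mp this).1, by omega⟩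
  · rintro ⟨hocc, hlm⟩
    have : l ≤ pvLCP (cs.drop (p - m).toNat) (cs.drop p.toNat) := hlcp.mpr ⟨hocc, hlen⟩
    simp only [le_min_iff]
    refine ⟨⟨hml, by omega, hlm⟩, by exact_mod_cast this⟩

lemma pvGo_eq (s sub : List Char) (j : Nat) :
    PySem.Chars.rfind.go s sub j =
      if ∃ i, i ≤ j ∧ sub.isPrefixOf (s.drop i) = true then
        ((Nat.findGreatest (fun i => sub.isPrefixOf (s.drop i) = true) j : Nat) : Int)
      else -1 := by
  induction j with
  | zero =>
    simp only [PySem.Chars.rfind.go]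
    by_cases h : sub.isPrefixOf s = true
    · rw [if_pos (by simpa using h), if_pos ⟨0, le_refl 0, by simpa using h⟩]
      simp
    · rw [if_neg (by simpa using h), if_neg]
      rintro ⟨i, hi, hp⟩
      have : i = 0 := by omega
      subst this
      simp at hp
      exact h (by simpa using hp)
  | succ j ih =>
    simp only [PySem.Chars.rfind.go]
    by_cases h : sub.isPrefixOf (s.drop (j + 1)) = true
    · rw [if_pos h, if_pos ⟨j + 1, le_refl _, h⟩, Nat.findGreatest_succ, if_pos h]
    · rw [if_neg h, ih]
      by_cases hex : ∃ i, i ≤ j ∧ sub.isPrefixOf (s.drop i) = true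
      · rw [if_pos hex, if_pos, Nat.findGreatest_succ, if_neg h]
        obtain ⟨i, hi, hp⟩ := hex
        exact ⟨i, by omega, hp⟩
      · rw [if_neg hex, if_neg]
        rintro ⟨i, hi, hp⟩
        rcases Nat.lt_or_ge i (j + 1) with h' | h'
        · exact hex ⟨i, by omega, hp⟩
        · have : i = j + 1 := by omega
          subst this; exact h hp

lemma pvRfindFrom_eq (cs sub : List Char) (lo p : Int) (h0 : 0 ≤ lo) (hlop : lo ≤ p)
    (hpn : p ≤ (cs.length : Int)) :
    PySem.Chars.rfindFrom cs sub lo (some p) =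
      (if PySem.Chars.rfind ((cs.take p.toNat).drop lo.toNat) sub = -1 then -1
       else lo + PySem.Chars.rfind ((cs.take p.toNat).drop lo.toNat) sub) := by
  unfold PySem.Chars.rfindFrom
  have he : (if (cs.length : Int) < p then (cs.length : Int) else if p < 0 then (if p + cs.length < 0 then 0 else p + cs.length) else p) = p := by
    rw [if_neg (by omega), if_neg (by omega)]
  have hst : (if lo < 0 then (if lo + cs.length < 0 then 0 else lo + cs.length) else lo) = lo := by
    rw [if_neg (by omega)]
  simp only [he, hst]
  rw [if_neg (by omega)]

lemma pvPrefix_take_iff (sub t : List Char) (a e : Nat) (hsub : sub ≠ []) :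
    sub <+: (t.take e).drop a ↔ sub <+: t.drop a ∧ a + sub.length ≤ e := by
  rw [List.drop_take, List.prefix_take_iff]
  constructor
  · rintro ⟨h1, h2⟩
    have : 0 < sub.length := List.length_pos_iff.mpr hsub
    exact ⟨h1, by omega⟩
  · rintro ⟨h1, h2⟩
    exact ⟨h1, by omega⟩

-- what B's rfind call returns for a pattern length l, in terms of pvQ
lemma pvFind (cs : List Char) (p lo : Int) (l : Nat) (hl : 1 ≤ l) (h0 : 0 ≤ lo)
    (hlop : lo ≤ p) (hpn : p ≤ (cs.length : Int)) (hlnp : (l : Int) ≤ (cs.length : Int) - p) :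
    (¬ pvQ cs p lo l →
      PySem.Chars.rfindFrom cs (PySem.List.slice cs (some p) (some (p + (l : Int)))) lo (some p) = -1) ∧
    (pvQ cs p lo l → ∃ j : Nat,
      PySem.Chars.rfindFrom cs (PySem.List.slice cs (some p) (some (p + (l : Int)))) lo (some p) = (j : Int) ∧
      lo.toNat ≤ j ∧ (j : Int) + l ≤ p ∧ (cs.drop p.toNat).take l <+: cs.drop j ∧
      ∀ j' : Nat, j < j' → (j' : Int) + (l : Int) ≤ p → ¬ (cs.drop p.toNat).take l <+: cs.drop j') := by
  have hsubeq : PySem.List.slice cs (some p) (some (p + (l : Int))) = (cs.drop p.toNat).take l := by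
    rw [PySem.List.slice_toNat cs (by omega) (by omega)]
    congr 1
    omega
  have hsublen : ((cs.drop p.toNat).take l).length = l := by
    simp only [List.length_take, List.length_drop]
    omega
  have hsubne : (cs.drop p.toNat).take l ≠ [] := by
    intro h
    rw [h] at hsublen
    simp at hsublen
    omega
  set sub := (cs.drop p.toNat).take l with hsub
  set s' := (cs.take p.toNat).drop lo.toNat with hs'
  have hs'len : s'.length = p.toNat - lo.toNat := by
    simp only [hs', List.length_drop, List.length_take]
    omega
  have htrans : ∀ i : Nat, (sub.isPrefixOf (s'.drop i) = true) ↔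
      (sub <+: cs.drop (lo.toNat + i) ∧ lo.toNat + i + l ≤ p.toNat) := by
    intro i
    rw [List.isPrefixOf_iff_prefix, hs', List.drop_drop, pvPrefix_take_iff sub cs (lo.toNat + i) p.toNat hsubne, hsublen]
  have hrfind : PySem.Chars.rfind s' sub = PySem.Chars.rfind.go s' sub s'.length := rfl
  have hexiff : (∃ i, i ≤ s'.length ∧ sub.isPrefixOf (s'.drop i) = true) ↔ pvQ cs p lo l := by
    constructor
    · rintro ⟨i, hi, hp⟩
      rw [htrans i] at hp
      exact ⟨lo.toNat + i, by omega, by omega, hp.1⟩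
    · rintro ⟨i', h1, h2, h3⟩
      refine ⟨i' - lo.toNat, by omega, ?_⟩
      rw [htrans]
      have : lo.toNat + (i' - lo.toNat) = i' := by omega
      rw [this]
      exact ⟨h3, by omega⟩
  rw [hsubeq, pvRfindFrom_eq cs sub lo p h0 hlop hpn, ← hs', hrfind, pvGo_eq]
  by_cases hex : ∃ i, i ≤ s'.length ∧ sub.isPrefixOf (s'.drop i) = true
  · obtain ⟨iw, hiw1, hiw2⟩ := hex
    have hex' : ∃ i, i ≤ s'.length ∧ sub.isPrefixOf (s'.drop i) = true := ⟨iw, hiw1, hiw2⟩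
    rw [if_pos hex']
    set i₀ := Nat.findGreatest (fun i => sub.isPrefixOf (s'.drop i) = true) s'.length with hi₀
    have hPi₀ : sub.isPrefixOf (s'.drop i₀) = true :=
      Nat.findGreatest_spec (P := fun i => sub.isPrefixOf (s'.drop i) = true) hiw1 hiw2
    have hgmax : ∀ i', i₀ < i' → i' ≤ s'.length → sub.isPrefixOf (s'.drop i') ≠ true :=
      fun i' h1 h2 => Nat.findGreatest_is_greatest (P := fun i => sub.isPrefixOf (s'.drop i) = true) h1 h2
    clear_value i₀
    rw [htrans] at hPi₀
    obtain ⟨hPa, hPb⟩ := hPi₀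
    have hne : ((i₀ : Nat) : Int) ≠ -1 := by omega
    rw [if_neg hne]
    constructor
    · intro hnq
      exact absurd (hexiff.mp hex') hnq
    · intro _
      refine ⟨lo.toNat + i₀, by push_cast; omega, by omega, by omega, hPa, ?_⟩
      intro j' hj' hj'p hocc
      refine hgmax (j' - lo.toNat) (by omega) (by omega) ?_
      rw [htrans]
      have hjj : lo.toNat + (j' - lo.toNat) = j' := by omega
      rw [hjj]
      exact ⟨hocc, by omega⟩
  · rw [if_neg hex, if_pos rfl]
    constructor
    · intro _; rfl
    · intro hq
      exact absurd (hexiff.mpr hq) hex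

-- ===== main equivalence =====
theorem pv_main (T : String) (p w ml : Int) :
    maxmatch_new T p w ml = maxmatch_new_alt T p w ml := by
  obtain ⟨hmax, hdisj⟩ := pvFoldA T.toList p ml (min (p + 1) w) (by omega)
  set cs := T.toList with hcs
  set n : Int := (cs.length : Int) with hn
  set R := (PySem.List.pyRange 1 (min (p + 1) w) 1).foldl
    (fun st m =>
      let cur := pvInnerA cs p m (PySem.List.pyRange 0 (min ml (min (n - p) m)) 1) 0
      if st.1 < cur then (cur, m) else st) (0, 0) with hR
  have hA : maxmatch_new T p w ml = (R.2, R.1) := rfl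
  have hB : maxmatch_new_alt T p w ml =
      pvSearchB cs p (p - min p (w - 1)) 1 (min ml (min (n - p) (min p (w - 1)))) (0, 0) := rfl
  rw [hA, hB]
  have hR10 : 0 ≤ R.1 := by
    rcases hdisj with ⟨h1, _⟩ | ⟨_, _, _, h4, _⟩ <;> omega
  by_cases hdeg : p ≤ 0 ∨ w ≤ 1 ∨ ml ≤ 0 ∨ n ≤ p
  · -- degenerate: both sides are (0, 0)
    have hcap0 : min ml (min (n - p) (min p (w - 1))) ≤ 0 := by omega
    rw [pvSearchB, dif_neg (by omega : ¬ (1 : Int) ≤ min ml (min (n - p) (min p (w - 1))))]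
    have hR00 : R = (0, 0) := by
      rcases hdisj with ⟨h1, h2⟩ | ⟨h1, h2, h3, h4, h5⟩
      · exact Prod.ext h1 h2
      · exfalso
        rcases hdeg with h | h | h | h
        · omega
        · omega
        · have : pvF cs p ml R.2 = 0 := by
            unfold pvF; rw [if_pos (by omega)]
          omega
        · have : pvF cs p ml R.2 = 0 := by
            unfold pvF; rw [if_pos (by omega)]
          omega
    rw [hR00]
  · have hp : 1 ≤ p := by omega
    have hw : 2 ≤ w := by omega
    have hml : 1 ≤ ml := by omega
    have hpn : p < n := by omega
    set lo := p - min p (w - 1) with hlo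
    set cap := min ml (min (n - p) (min p (w - 1))) with hcap
    have hlo0 : 0 ≤ lo := by omega
    have hlop : lo ≤ p := by omega
    have hcap1 : 1 ≤ cap := by omega
    have hR1cap : R.1 ≤ cap := by
      rcases hdisj with ⟨h1, _⟩ | ⟨h1, h2, h3, h4, _⟩
      · omega
      · have := pvF_le cs p ml R.2 (by omega)
        omega
    -- pvQ at a length l ≤ cap is the existence of an offset m with pvF m ≥ l
    have hQ1 : ∀ l : Nat, 1 ≤ l → (l : Int) ≤ cap → pvQ cs p lo l →
        ∃ m : Int, 1 ≤ m ∧ m < min (p + 1) w ∧ (l : Int) ≤ pvF cs p ml m := by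
      intro l h1 h2 ⟨i, hi1, hi2, hi3⟩
      refine ⟨p - i, by omega, by omega, ?_⟩
      rw [pvBridge cs p ml (p - i) l h1 (by omega) (by omega) (by omega) (by omega)]
      have : (p - (p - (i : Int))).toNat = i := by omega
      rw [this]
      exact ⟨hi3, by omega⟩
    have hQ2 : ∀ l : Nat, 1 ≤ l → (l : Int) ≤ cap →
        (∃ m : Int, 1 ≤ m ∧ m < min (p + 1) w ∧ (l : Int) ≤ pvF cs p ml m) → pvQ cs p lo l := by
      intro l h1 h2 ⟨m, hm1, hm2, hm3⟩
      rw [pvBridge cs p ml m l h1 (by omega) (by omega) hm1 (by omega)] at hm3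
      exact ⟨(p - m).toNat, by omega, by omega, hm3.1⟩
    -- terminal state of the binary search: best is exactly A's answer
    have hterm : ∀ (lo_l hi_l : Int) (best : Int × Int), hi_l < lo_l →
        1 ≤ lo_l → lo_l ≤ cap + 1 → hi_l ≤ cap →
        (∀ l : Nat, 1 ≤ l → (l : Int) < lo_l → pvQ cs p lo l) →
        (∀ l : Nat, hi_l < (l : Int) → (l : Int) ≤ cap → ¬ pvQ cs p lo l) →
        ((lo_l = 1 ∧ best = (0, 0)) ∨
          (2 ≤ lo_l ∧ ∃ j : Nat, best = (p - (j : Int), lo_l - 1) ∧ lo.toNat ≤ j ∧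
            (j : Int) + (lo_l - 1) ≤ p ∧
            (cs.drop p.toNat).take (lo_l - 1).toNat <+: cs.drop j ∧
            ∀ j' : Nat, j < j' → (j' : Int) + (lo_l - 1) ≤ p →
              ¬ (cs.drop p.toNat).take (lo_l - 1).toNat <+: cs.drop j')) →
        best = (R.2, R.1) := by
      intro lo_l hi_l best hlt h1l h1l' h2l hbelow habove hbest
      have hR1a : R.1 ≤ lo_l - 1 := by
        by_contra hcon
        rcases hdisj with ⟨hz, _⟩ | ⟨ha, hb, hc, hd, he⟩
        · omega
        · refine habove R.1.toNat (by omega) (by omega) ?_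
          refine hQ2 R.1.toNat (by omega) (by omega) ⟨R.2, ha, hb, by omega⟩
      have hR1b : lo_l - 1 ≤ R.1 := by
        rcases Int.lt_or_le 1 lo_l with hgt | hle
        · obtain ⟨m, hm1, hm2, hm3⟩ :=
            hQ1 (lo_l - 1).toNat (by omega) (by omega) (hbelow (lo_l - 1).toNat (by omega) (by omega))
          have := hmax m hm1 hm2
          omega
        · omega
      rcases hbest with ⟨hl1, hb⟩ | ⟨hl2, j, hbj, hjlo, hjp, hjocc, hjmax⟩
      · have hR1z : R.1 = 0 := by omega
        have hR00 : R = (0, 0) := by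
          rcases hdisj with ⟨hz1, hz2⟩ | ⟨_, _, _, hd, _⟩
          · exact Prod.ext hz1 hz2
          · omega
        rw [hb, hR00]
      · have hR1e : R.1 = lo_l - 1 := by omega
        rcases hdisj with ⟨hz, _⟩ | ⟨ha, hb2, hc, hd, he⟩
        · omega
        · have hocc2 : (cs.drop p.toNat).take (lo_l - 1).toNat <+: cs.drop (p - R.2).toNat ∧
              (((lo_l - 1).toNat : Nat) : Int) ≤ R.2 := by
            rw [← pvBridge cs p ml R.2 (lo_l - 1).toNat (by omega) (by omega) (by omega) ha (by omega)]
            omega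
          obtain ⟨hocc2a, hocc2b⟩ := hocc2
          have hjew : (j : Int) = p - R.2 := by
            rcases lt_trichotomy ((j : Int)) (p - R.2) with h | h | h
            · exact absurd hocc2a (hjmax (p - R.2).toNat (by omega) (by omega))
            · exact h
            · exfalso
              have hm' : (1:Int) ≤ p - j := by omega
              have hFj : (((lo_l - 1).toNat : Nat) : Int) ≤ pvF cs p ml (p - j) := by
                rw [pvBridge cs p ml (p - j) (lo_l - 1).toNat (by omega) (by omega) (by omega) hm' (by omega)]
                refine ⟨?_, by omega⟩
                have hjj : (p - (p - (j : Int))).toNat = j := by omega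
                rw [hjj]
                exact hjocc
              have := he (p - j) hm' (by omega)
              omega
          rw [hbj, hjew, hR1e]
          congr 1
          omega
    -- the binary search maintains: every shorter length matches, every longer one does not
    have hsearch : ∀ (d : Nat) (lo_l hi_l : Int) (best : Int × Int),
        (hi_l - lo_l + 1).toNat ≤ d →
        1 ≤ lo_l → lo_l ≤ cap + 1 → hi_l ≤ cap →
        (∀ l : Nat, 1 ≤ l → (l : Int) < lo_l → pvQ cs p lo l) →
        (∀ l : Nat, hi_l < (l : Int) → (l : Int) ≤ cap → ¬ pvQ cs p lo l) →
        ((lo_l = 1 ∧ best = (0, 0)) ∨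
          (2 ≤ lo_l ∧ ∃ j : Nat, best = (p - (j : Int), lo_l - 1) ∧ lo.toNat ≤ j ∧
            (j : Int) + (lo_l - 1) ≤ p ∧
            (cs.drop p.toNat).take (lo_l - 1).toNat <+: cs.drop j ∧
            ∀ j' : Nat, j < j' → (j' : Int) + (lo_l - 1) ≤ p →
              ¬ (cs.drop p.toNat).take (lo_l - 1).toNat <+: cs.drop j')) →
        pvSearchB cs p lo lo_l hi_l best = (R.2, R.1) := by
      intro d
      induction d with
      | zero =>
        intro lo_l hi_l best hd h1l h1l' h2l hbelow habove hbest
        have hlt : hi_l < lo_l := by omega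
        rw [pvSearchB, dif_neg (by omega : ¬ lo_l ≤ hi_l)]
        exact hterm lo_l hi_l best hlt h1l h1l' h2l hbelow habove hbest
      | succ d ih =>
        intro lo_l hi_l best hd h1l h1l' h2l hbelow habove hbest
        by_cases hcmp : lo_l ≤ hi_l
        · obtain ⟨hm1, hm2⟩ := PySem.Int.floordiv_two_mid_bounds hcmp
          rw [pvSearchB, dif_pos hcmp]
          show (if PySem.Chars.rfindFrom cs
                (PySem.List.slice cs (some p) (some (p + PySem.Int.floordiv (lo_l + hi_l) 2))) lo (some p) = -1
            then pvSearchB cs p lo lo_l (PySem.Int.floordiv (lo_l + hi_l) 2 - 1) best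
            else pvSearchB cs p lo (PySem.Int.floordiv (lo_l + hi_l) 2 + 1) hi_l
              (p - PySem.Chars.rfindFrom cs
                (PySem.List.slice cs (some p) (some (p + PySem.Int.floordiv (lo_l + hi_l) 2))) lo (some p),
               PySem.Int.floordiv (lo_l + hi_l) 2)) = (R.2, R.1)
          generalize hg : PySem.Int.floordiv (lo_l + hi_l) 2 = mid at hm1 hm2 ⊢
          clear hg
          have hmidc : ((mid.toNat : Nat) : Int) = mid := by omega
          have hfind := pvFind cs p lo mid.toNat (by omega) hlo0 hlop (by omega) (by omega)
          rw [hmidc] at hfind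
          by_cases hQm : pvQ cs p lo mid.toNat
          · obtain ⟨j, hjeq, hjlo, hjp, hjocc, hjmax⟩ := hfind.2 hQm
            have htest : (hi_l - (mid + 1) + 1).toNat ≤ d := by clear hfind hbest; omega
            rw [hjeq, if_neg (by omega : ¬ ((j : Nat) : Int) = -1)]
            refine ih (mid + 1) hi_l (p - (j : Int), mid) (by omega) (by omega) (by omega) h2l
              ?_ habove (Or.inr ⟨by omega, j, ?_, hjlo, ?_, ?_, ?_⟩)
            · intro l hl1 hl2
              exact pvQ_mono cs p lo mid.toNat l (by omega) hQm
            · have e : mid + 1 - 1 = mid := by ring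
              rw [e]
            · have e : mid + 1 - 1 = mid := by ring
              rw [e]; omega
            · have e : (mid + 1 - 1).toNat = mid.toNat := by omega
              rw [e]; exact hjocc
            · have e : (mid + 1 - 1).toNat = mid.toNat := by omega
              have e2 : mid + 1 - 1 = mid := by ring
              rw [e, e2]
              intro j' hjj' hjp'
              exact hjmax j' hjj' (by omega)
          · rw [hfind.1 hQm, if_pos rfl]
            refine ih lo_l (mid - 1) best (by omega) h1l h1l' (by omega) hbelow ?_ hbest
            intro l hl1 hl2
            by_cases hlh : hi_l < (l : Int)
            · exact habove l hlh hl2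
            · intro hQl
              exact hQm (pvQ_mono cs p lo l mid.toNat (by omega) hQl)
        · rw [pvSearchB, dif_neg hcmp]
          exact hterm lo_l hi_l best (by omega) h1l h1l' h2l hbelow habove hbest
    have := hsearch (cap - 1 + 1).toNat 1 cap (0, 0) (by omega) (by omega) (by omega)
      (le_refl cap) (fun l hl1 hl2 => by omega) (fun l hl1 hl2 => by omega) (Or.inl ⟨rfl, rfl⟩)
    exact this.symm

-- ===== VERDICT (by name: the statement is the Claim_ definition above) =====
theorem maxmatch_new_spec : Claim_equal_maxmatch_new := by
  intro T p w ml _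
  exact pv_main T p w ml
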